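-- pv_equiv track=rewrite | github.com/Kai124816/Class-Encore-Fall | week_6/exam_solutions.py | highest_scores
-- ===== SOURCE A (Python) =====
-- def highest_scores(records: list[tuple[str, int]]) -> list[tuple[str, int]]:
--     """From a list of (player, score) pairs, return the pairs showing
--     the highest score achieved by each player.
--
--     >>> highest_scores([("Luna", 8), ("Kai", 10), ("Luna", 12), ("Kai", 7), ("Taro", 9)])
--     [('Luna', 12), ('Kai', 10), ('Taro', 9)]
--     """
--     score_dict = {}
--     for player,score in records:
--         if player in score_dict and score > score_dict[player]:
--             score_dict[player] = score
--         elif player not in score_dict: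
--             score_dict[player] = score
--
--     hs_list = []
--     for player,score in score_dict.items():
--         hs_list.append((player,score))
--
--     return hs_list
-- ===== SOURCE B (Python) =====
-- def highest_scores(records: list[tuple[str, int]]) -> list[tuple[str, int]]:
--     """Collect-then-reduce: group all scores per player (first-appearance
--     key order), then take max of each group in a second pass."""
--     groups = {}
--     for player, score in records:
--         groups.setdefault(player, []).append(score)
--     return [(player, max(scores)) for player, scores in groups.items()]
-- ===== Notes on version B (the rewrite author's own statement) =====
-- stated objective: alternative
-- what changed: Replaces A's running-max with conditional overwrite by a collect-then-reduce decomposition: group every score per player into a dict of lists, then emit (player, max(scores)) per group.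
import Mathlib
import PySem

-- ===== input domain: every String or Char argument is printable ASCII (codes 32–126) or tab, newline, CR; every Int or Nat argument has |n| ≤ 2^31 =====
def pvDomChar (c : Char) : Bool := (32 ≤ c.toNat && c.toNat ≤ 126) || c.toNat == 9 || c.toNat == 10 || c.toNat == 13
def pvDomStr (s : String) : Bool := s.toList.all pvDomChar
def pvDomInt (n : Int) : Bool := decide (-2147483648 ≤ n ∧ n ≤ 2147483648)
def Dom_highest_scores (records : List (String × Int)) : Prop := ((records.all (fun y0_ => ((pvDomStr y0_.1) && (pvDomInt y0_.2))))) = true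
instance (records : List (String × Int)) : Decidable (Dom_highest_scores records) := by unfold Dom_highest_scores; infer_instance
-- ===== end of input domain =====

-- B replaces A's running-max with conditional overwrite by a collect-then-reduce
-- decomposition (group all scores per player, then take the max of each group);
-- same cost, alternative structure.


-- ===== PORT A =====
-- one loop-body step of A: keep a running max per player in score_dict
def hsStepA (d : PySem.Dict String Int) (r : String × Int) : PySem.Dict String Int :=
  if d.contains r.1 && decide (d.getD r.1 0 < r.2) then d.insert r.1 r.2
  else if !d.contains r.1 then d.insert r.1 r.2
  else d

def highest_scores (records : List (String × Int)) : List (String × Int) :=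
  let score_dict := records.foldl hsStepA PySem.Dict.empty
  score_dict.items.foldl (fun hs_list p => hs_list ++ [(p.1, p.2)]) []

-- ===== PORT B =====
-- max(scores): scores is nonempty by construction, so the .getD 0 default is never used
def hsMax (scores : List Int) : Int := (PySem.List.max? scores id).getD 0

def highest_scores_alt (records : List (String × Int)) : List (String × Int) :=
  let groups := records.foldl (fun d r => d.modify r.1 [] (· ++ [r.2])) PySem.Dict.empty
  groups.items.map (fun p => (p.1, hsMax p.2))

-- ===== PRECONDITION & SPEC =====
def Spec_highest_scores (records : List (String × Int)) (out : List (String × Int)) : Prop := out = highest_scores_alt records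
instance (records : List (String × Int)) (out : List (String × Int)) : Decidable (Spec_highest_scores records out) := by unfold Spec_highest_scores; infer_instance

-- ===== CLAIM (what is proved, stated in full; the proofs are below) =====
def Claim_equal_highest_scores : Prop := ∀ (records : List (String × Int)), Dom_highest_scores records → Spec_highest_scores records (highest_scores records)

-- ===== LEMMAS AND PROOFS =====

-- A's dict is the per-key max image of B's dict of groups
def hsInv (dA : PySem.Dict String Int) (dB : PySem.Dict String (List Int)) : Prop :=
  dA.items = dB.items.map (fun p => (p.1, hsMax p.2)) ∧ dB.keys.Nodup ∧ ∀ p ∈ dB.items, p.2 ≠ []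

lemma hsMax?_some (a : Int) (xs : List Int) :
    ∃ m, PySem.List.max? (a :: xs) id = some m := by
  induction xs generalizing a with
  | nil => exact ⟨a, rfl⟩
  | cons x xs ih =>
    have h1 : PySem.List.max? (a :: x :: xs) id = PySem.List.max? ((if a < x then x else a) :: xs) id := by
      by_cases h : a < x <;> simp [PySem.List.max?, h]
    rw [h1]; exact ih _

lemma hsMax_append_singleton (l : List Int) (s : Int) (hl : l ≠ []) :
    hsMax (l ++ [s]) = if hsMax l < s then s else hsMax l := by
  obtain ⟨m, hm⟩ : ∃ m, PySem.List.max? l id = some m := by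
    cases l with
    | nil => exact absurd rfl hl
    | cons x xs => exact hsMax?_some x xs
  simp only [hsMax, PySem.List.max?] at hm ⊢
  rw [List.foldl_append, hm]
  simp only [List.foldl_cons, List.foldl_nil, id]
  by_cases h : m < s <;> simp [h]

lemma hsInv_step (dA : PySem.Dict String Int) (dB : PySem.Dict String (List Int))
    (r : String × Int) (h : hsInv dA dB) :
    hsInv (hsStepA dA r) (dB.modify r.1 [] (· ++ [r.2])) := by
  obtain ⟨hitems, hnd, hne⟩ := h
  have hkeys : dA.keys = dB.keys := by
    simp only [PySem.Dict.keys, hitems, List.map_map]; rfl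
  have hcont : dA.contains r.1 = dB.contains r.1 := by
    simp [PySem.Dict.contains_eq_decide_mem_keys, hkeys]
  by_cases hc : dB.contains r.1 = true
  · -- key present: B extends the group in place, A overwrites iff strictly greater
    have hg : dB.get? r.1 = some (dB.getD r.1 []) := by
      rcases hg0 : dB.get? r.1 with _ | l
      · rw [PySem.Dict.get?_eq_none_iff_contains] at hg0; simp [hg0] at hc
      · rw [PySem.Dict.getD_eq_get?_getD, hg0]; rfl
    set l := dB.getD r.1 [] with hldef
    have hl : (r.1, l) ∈ dB.items := PySem.Dict.mem_items_of_get?_eq_some dB hg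
    have hlne : l ≠ [] := hne _ hl
    have hAval : dA.getD r.1 0 = hsMax l := by
      refine PySem.Dict.getD_of_mem_items dA ?_ ?_ 0
      · rw [hitems]; exact List.mem_map_of_mem hl
      · rw [hkeys]; exact hnd
    have hBitems : (dB.modify r.1 [] (· ++ [r.2])).items
        = dB.items.map (fun p => if p.1 == r.1 then (r.1, l ++ [r.2]) else p) := by
      simp only [PySem.Dict.modify, ← hldef]
      exact PySem.Dict.items_insert_of_contains dB _ hc
    have hval : ∀ q ∈ dB.items, q.1 = r.1 → q.2 = l := by
      intro q hq hq1
      have hmem := (PySem.Dict.get?_eq_some_iff_mem_items dB q.1 q.2 hnd).2 hq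
      rw [hq1, hg] at hmem
      exact (Option.some.inj hmem).symm
    have hmapped : (dB.modify r.1 [] (· ++ [r.2])).items.map (fun p => (p.1, hsMax p.2))
        = dB.items.map (fun p => if p.1 == r.1 then (r.1, hsMax (l ++ [r.2])) else (p.1, hsMax p.2)) := by
      rw [hBitems, List.map_map]
      refine List.map_congr_left (fun q hq => ?_)
      by_cases hq1 : q.1 = r.1 <;> simp [hq1]
    refine ⟨?_, ?_, ?_⟩
    · -- items equation
      rw [hmapped, hsMax_append_singleton l r.2 hlne]
      by_cases hgt : hsMax l < r.2
      · have hA' : hsStepA dA r = dA.insert r.1 r.2 := by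
          unfold hsStepA; rw [hcont, hc, hAval]; simp [hgt]
        have hcA : dA.contains r.1 = true := by rw [hcont]; exact hc
        rw [hA', PySem.Dict.items_insert_of_contains dA _ hcA, hitems, List.map_map]
        refine List.map_congr_left (fun q hq => ?_)
        by_cases hq1 : q.1 = r.1
        · simp [hq1, hgt]
        · simp [hq1]
      · have hA' : hsStepA dA r = dA := by
          unfold hsStepA; rw [hcont, hc, hAval]; simp [hgt]
        rw [hA', hitems]
        refine (List.map_congr_left (fun q hq => ?_)).symm
        by_cases hq1 : q.1 = r.1
        · simp [hq1, hval q hq hq1, hgt]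
        · simp [hq1]
    · simpa [PySem.Dict.modify] using PySem.Dict.nodup_keys_insert dB r.1 _ hnd
    · intro p hp
      rw [hBitems] at hp
      obtain ⟨q, hq, hqe⟩ := List.mem_map.1 hp
      by_cases hq1 : q.1 == r.1
      · simp only [hq1, if_true] at hqe; subst hqe; simp
      · simp only [hq1, if_false, Bool.false_eq_true] at hqe; subst hqe; exact hne _ hq
  · -- key absent: both append a fresh entry
    have hc' : dB.contains r.1 = false := by simpa using hc
    have hcA : dA.contains r.1 = false := by rw [hcont]; exact hc'
    have hBitems : (dB.modify r.1 [] (· ++ [r.2])).items = dB.items ++ [(r.1, [r.2])] := by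
      simp only [PySem.Dict.modify, PySem.Dict.getD_of_not_contains dB [] hc', List.nil_append]
      exact PySem.Dict.items_insert_of_not_contains dB _ hc'
    have hA' : hsStepA dA r = dA.insert r.1 r.2 := by
      unfold hsStepA; rw [hcA]; simp
    refine ⟨?_, ?_, ?_⟩
    · rw [hA', PySem.Dict.items_insert_of_not_contains dA _ hcA, hBitems, List.map_append, hitems]
      simp [hsMax, PySem.List.max?]
    · simpa [PySem.Dict.modify] using PySem.Dict.nodup_keys_insert dB r.1 _ hnd
    · intro p hp
      rw [hBitems] at hp
      rcases List.mem_append.1 hp with h1 | h1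
      · exact hne _ h1
      · simp at h1; subst h1; simp

lemma hsInv_foldl (records : List (String × Int)) :
    ∀ (dA : PySem.Dict String Int) (dB : PySem.Dict String (List Int)), hsInv dA dB →
    hsInv (records.foldl hsStepA dA) (records.foldl (fun d r => d.modify r.1 [] (· ++ [r.2])) dB) := by
  induction records with
  | nil => intro dA dB h; exact h
  | cons r rs ih => intro dA dB h; exact ih _ _ (hsInv_step dA dB r h)

-- ===== VERDICT (by name: the statement is the Claim_ definition above) =====
theorem highest_scores_spec : Claim_equal_highest_scores := by
  intro records _
  unfold Spec_highest_scores highest_scores highest_scores_alt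
  have h := hsInv_foldl records PySem.Dict.empty PySem.Dict.empty
    ⟨by simp [PySem.Dict.empty], by simp [PySem.Dict.empty, PySem.Dict.keys], by simp [PySem.Dict.empty]⟩
  simp only [PySem.List.foldl_append_singleton_eq_map, h.1, List.map_map, List.nil_append]
  rfl
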